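-- pv_equiv track=rewrite | github.com/Joe-Ralph/algoexpertSolved | 049.largest-range.py | longestRange
-- ===== SOURCE A (Python) =====
-- def longestRange(arr):
--     hashmap = {}
--     bestRange = [None,None]
--     maxRange = float('-inf')
--     for i in arr:
--         hashmap[i] = True
--     for i in hashmap:
--         if not hashmap[i]:
--             continue
--         currentRange = 0
--         left = i-1
--         right = i+1
--         while left in hashmap:
--             left-=1
--             currentRange+=1
--         while right in hashmap:
--             right+=1
--             currentRange+=1
--         if currentRange > maxRange:
--             maxRange = currentRange
--             bestRange = [left+1,right-1]
--     return bestRange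
-- ===== SOURCE B (Python) =====
-- def longestRange(arr):
--     # Expand each maximal consecutive run once, marking its members visited.
--     nums = dict.fromkeys(arr)      # distinct values, first-occurrence order
--     visited = set()
--     best = [None, None]
--     maxLen = -1
--     for x in nums:
--         if x in visited:
--             continue
--         visited.add(x)
--         left = x - 1
--         while left in nums:
--             visited.add(left)
--             left -= 1
--         right = x + 1
--         while right in nums:
--             visited.add(right)
--             right += 1
--         if right - left - 2 > maxLen:
--             maxLen = right - left - 2
--             best = [left + 1, right - 1]
--     return best
-- ===== Notes on version B (the rewrite author's own statement) =====
-- stated objective: alternative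
-- what changed: B marks every member of a consecutive run as visited while expanding it, so each distinct value is expanded exactly once, and the run length is computed from the endpoints instead of an incremented counter; A re-expands the whole run from every one of its members.
import Mathlib
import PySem

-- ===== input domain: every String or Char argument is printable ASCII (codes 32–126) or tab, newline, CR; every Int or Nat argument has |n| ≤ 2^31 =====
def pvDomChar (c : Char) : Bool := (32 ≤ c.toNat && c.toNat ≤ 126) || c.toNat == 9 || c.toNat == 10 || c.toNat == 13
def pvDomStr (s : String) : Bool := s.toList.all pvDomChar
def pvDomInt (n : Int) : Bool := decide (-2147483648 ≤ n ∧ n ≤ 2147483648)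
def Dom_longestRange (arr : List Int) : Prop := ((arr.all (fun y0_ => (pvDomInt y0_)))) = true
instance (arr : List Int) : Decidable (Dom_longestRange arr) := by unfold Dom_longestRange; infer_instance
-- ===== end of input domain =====

-- B re-implements A's scan so that each maximal consecutive run is expanded only once
-- (members are marked visited) and the run length comes from the endpoints, not a counter.

-- termination helpers cited by the while-loop recursions below
theorem pvCountL_lt {left : Int} {K : List Int} (h : left ∈ K) :
    K.countP (fun y => decide (y ≤ left - 1)) < K.countP (fun y => decide (y ≤ left)) := by
  induction K with
  | nil => cases h
  | cons a t ih =>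
    simp only [List.countP_cons]
    rcases List.mem_cons.mp h with h3 | h3
    · subst h3
      have hm : t.countP (fun y => decide (y ≤ left - 1)) ≤ t.countP (fun y => decide (y ≤ left)) := by
        apply List.countP_mono_left
        intro x hx hp
        simp only [decide_eq_true_eq] at hp ⊢
        omega
      rw [decide_eq_false (by omega : ¬(left ≤ left - 1)), decide_eq_true (by omega : left ≤ left)]
      simp only [Bool.false_eq_true, if_false, reduceIte]; omega
    · have := ih h3
      by_cases h1 : a ≤ left - 1
      · rw [decide_eq_true h1, decide_eq_true (by omega : a ≤ left)]
        simp only [reduceIte]; omega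
      · by_cases h2 : a ≤ left
        · rw [decide_eq_false h1, decide_eq_true h2]
          simp only [Bool.false_eq_true, if_false, reduceIte]; omega
        · rw [decide_eq_false h1, decide_eq_false h2]
          simp only [Bool.false_eq_true, if_false]; omega

theorem pvCountR_lt {right : Int} {K : List Int} (h : right ∈ K) :
    K.countP (fun y => decide (right + 1 ≤ y)) < K.countP (fun y => decide (right ≤ y)) := by
  induction K with
  | nil => cases h
  | cons a t ih =>
    simp only [List.countP_cons]
    rcases List.mem_cons.mp h with h3 | h3
    · subst h3
      have hm : t.countP (fun y => decide (right + 1 ≤ y)) ≤ t.countP (fun y => decide (right ≤ y)) := by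
        apply List.countP_mono_left
        intro x hx hp
        simp only [decide_eq_true_eq] at hp ⊢
        omega
      rw [decide_eq_false (by omega : ¬(right + 1 ≤ right)), decide_eq_true (by omega : right ≤ right)]
      simp only [Bool.false_eq_true, if_false, reduceIte]; omega
    · have := ih h3
      by_cases h1 : right + 1 ≤ a
      · rw [decide_eq_true h1, decide_eq_true (by omega : right ≤ a)]
        simp only [reduceIte]; omega
      · by_cases h2 : right ≤ a
        · rw [decide_eq_false h1, decide_eq_true h2]
          simp only [Bool.false_eq_true, if_false, reduceIte]; omega
        · rw [decide_eq_false h1, decide_eq_false h2]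
          simp only [Bool.false_eq_true, if_false]; omega

-- ===== PORT A =====
-- 'while left in hashmap: left -= 1; currentRange += 1'  (dict membership = key membership)
def pvA_goL (K : List Int) (left : Int) (cr : Int) : Int × Int :=
  if h : left ∈ K then pvA_goL K (left - 1) (cr + 1) else (left, cr)
termination_by K.countP (fun y => decide (y ≤ left))
decreasing_by exact pvCountL_lt h

-- 'while right in hashmap: right += 1; currentRange += 1'
def pvA_goR (K : List Int) (right : Int) (cr : Int) : Int × Int :=
  if h : right ∈ K then pvA_goR K (right + 1) (cr + 1) else (right, cr)
termination_by K.countP (fun y => decide (right ≤ y))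
decreasing_by exact pvCountR_lt h

-- maxRange = float('-inf') is modelled as 'none'; 'currentRange > maxRange'
def pvNegInfLt (cr : Int) (m : Option Int) : Bool :=
  match m with
  | none => true
  | some v => decide (v < cr)

def longestRange (arr : List Int) : List (Option Int) :=
  let hashmap : PySem.Dict Int Bool := arr.foldl (fun d i => d.insert i true) PySem.Dict.empty
  let st :=
    hashmap.keys.foldl
      (fun (st : List (Option Int) × Option Int) i =>
        if hashmap.getD i false = false then st   -- 'if not hashmap[i]: continue' (i is a key of hashmap)
        else
          let lc := pvA_goL hashmap.keys (i - 1) 0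
          let rc := pvA_goR hashmap.keys (i + 1) lc.2
          if pvNegInfLt rc.2 st.2 then ([some (lc.1 + 1), some (rc.1 - 1)], some rc.2)
          else st)
      ([none, none], none)
  st.1

-- ===== PORT B =====
-- 'while left in nums: visited.add(left); left -= 1'
def pvB_goL (K : List Int) (visited : PySem.Set Int) (left : Int) : PySem.Set Int × Int :=
  if h : left ∈ K then pvB_goL K (visited.add left) (left - 1) else (visited, left)
termination_by K.countP (fun y => decide (y ≤ left))
decreasing_by exact pvCountL_lt h

-- 'while right in nums: visited.add(right); right += 1'
def pvB_goR (K : List Int) (visited : PySem.Set Int) (right : Int) : PySem.Set Int × Int :=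
  if h : right ∈ K then pvB_goR K (visited.add right) (right + 1) else (visited, right)
termination_by K.countP (fun y => decide (right ≤ y))
decreasing_by exact pvCountR_lt h

def longestRange_alt (arr : List Int) : List (Option Int) :=
  let nums : PySem.Set Int := PySem.Set.ofList arr   -- dict.fromkeys(arr): distinct values, first-occurrence order
  let st :=
    nums.foldl
      (fun (st : PySem.Set Int × List (Option Int) × Int) x =>
        if x ∈ st.1 then st
        else
          let vl := pvB_goL nums (st.1.add x) (x - 1)
          let vr := pvB_goR nums vl.1 (x + 1)
          if st.2.2 < vr.2 - vl.2 - 2 then (vr.1, [some (vl.2 + 1), some (vr.2 - 1)], vr.2 - vl.2 - 2)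
          else (vr.1, st.2.1, st.2.2))
      (PySem.Set.empty, [none, none], -1)
  st.2.1

-- ===== PRECONDITION & SPEC =====
def Spec_longestRange (arr : List Int) (out : List (Option Int)) : Prop := out = longestRange_alt arr
instance (arr : List Int) (out : List (Option Int)) : Decidable (Spec_longestRange arr out) := by unfold Spec_longestRange; infer_instance

-- ===== CLAIM (what is proved, stated in full; the proofs are below) =====
def Claim_equal_longestRange : Prop := ∀ (arr : List Int), Dom_longestRange arr → Spec_longestRange arr (longestRange arr)

-- ===== LEMMAS AND PROOFS =====

theorem pvA_goL_post (K : List Int) (l c : Int) :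
    (pvA_goL K l c).1 ∉ K ∧ (pvA_goL K l c).1 ≤ l ∧ (pvA_goL K l c).2 = c + (l - (pvA_goL K l c).1) ∧
      ∀ j, (pvA_goL K l c).1 < j → j ≤ l → j ∈ K := by
  fun_induction pvA_goL K l c with
  | case1 left cr h ih =>
    obtain ⟨i1, i2, i3, i4⟩ := ih
    refine ⟨i1, by omega, by omega, ?_⟩
    intro j hj1 hj2
    by_cases hje : j = left
    · exact hje ▸ h
    · exact i4 j hj1 (by omega)
  | case2 left cr h =>
    exact ⟨h, le_refl _, by omega, fun j h1 h2 => (by simp at h1 h2; omega : False).elim⟩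

theorem pvA_goR_post (K : List Int) (r c : Int) :
    (pvA_goR K r c).1 ∉ K ∧ r ≤ (pvA_goR K r c).1 ∧ (pvA_goR K r c).2 = c + ((pvA_goR K r c).1 - r) ∧
      ∀ j, r ≤ j → j < (pvA_goR K r c).1 → j ∈ K := by
  fun_induction pvA_goR K r c with
  | case1 right cr h ih =>
    obtain ⟨i1, i2, i3, i4⟩ := ih
    refine ⟨i1, by omega, by omega, ?_⟩
    intro j hj1 hj2
    by_cases hje : j = right
    · exact hje ▸ h
    · exact i4 j (by omega) hj2
  | case2 right cr h =>
    exact ⟨h, le_refl _, by omega, fun j h1 h2 => (by simp at h1 h2; omega : False).elim⟩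

theorem pvA_goL_step (K : List Int) (left cr : Int) (h : left ∈ K) :
    pvA_goL K left cr = pvA_goL K (left - 1) (cr + 1) := by
  rw [pvA_goL, dif_pos h]

theorem pvA_goL_base (K : List Int) (left cr : Int) (h : left ∉ K) :
    pvA_goL K left cr = (left, cr) := by
  rw [pvA_goL, dif_neg h]

theorem pvA_goR_step (K : List Int) (right cr : Int) (h : right ∈ K) :
    pvA_goR K right cr = pvA_goR K (right + 1) (cr + 1) := by
  rw [pvA_goR, dif_pos h]

theorem pvA_goR_base (K : List Int) (right cr : Int) (h : right ∉ K) :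
    pvA_goR K right cr = (right, cr) := by
  rw [pvA_goR, dif_neg h]


theorem pvA_goL_fst (K : List Int) (l c c' : Int) : (pvA_goL K l c).1 = (pvA_goL K l c').1 := by
  obtain ⟨p1, p2, p3, p4⟩ := pvA_goL_post K l c
  obtain ⟨q1, q2, q3, q4⟩ := pvA_goL_post K l c'
  rcases lt_trichotomy (pvA_goL K l c).1 (pvA_goL K l c').1 with hlt | heq | hgt
  · exact absurd (p4 _ hlt q2) q1
  · exact heq
  · exact absurd (q4 _ hgt p2) p1

theorem pvA_goR_fst (K : List Int) (r c c' : Int) : (pvA_goR K r c).1 = (pvA_goR K r c').1 := by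
  obtain ⟨p1, p2, p3, p4⟩ := pvA_goR_post K r c
  obtain ⟨q1, q2, q3, q4⟩ := pvA_goR_post K r c'
  rcases lt_trichotomy (pvA_goR K r c).1 (pvA_goR K r c').1 with hlt | heq | hgt
  · exact absurd (q4 _ p2 hlt) p1
  · exact heq
  · exact absurd (p4 _ q2 hgt) q1

theorem pvA_goR_shift (K : List Int) (r c : Int) :
    pvA_goR K r c = ((pvA_goR K r 0).1, c + (pvA_goR K r 0).2) := by
  have hf := pvA_goR_fst K r c 0
  obtain ⟨p1, p2, p3, p4⟩ := pvA_goR_post K r c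
  obtain ⟨q1, q2, q3, q4⟩ := pvA_goR_post K r 0
  exact Prod.ext hf (by omega)

theorem pvA_goL_charAux (K : List Int) (a : Int) (h3 : (a - 1) ∉ K) :
    ∀ (n : Nat) (l c : Int), (l + 1 - a).toNat = n → a ≤ l + 1 →
      (∀ j, a ≤ j → j ≤ l → j ∈ K) → pvA_goL K l c = (a - 1, c + (l + 1 - a)) := by
  intro n
  induction n with
  | zero =>
    intro l c hn h1 h2
    have hl : l = a - 1 := by omega
    subst hl
    rw [pvA_goL_base K _ _ h3]
    exact Prod.ext rfl (by omega)
  | succ n ih =>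
    intro l c hn h1 h2
    have hmem : l ∈ K := h2 l (by omega) (le_refl _)
    rw [pvA_goL_step K l c hmem,
      ih (l - 1) (c + 1) (by omega) (by omega) (fun j hj1 hj2 => h2 j hj1 (by omega))]
    exact Prod.ext rfl (by omega)

theorem pvA_goL_char (K : List Int) (a l c : Int) (h1 : a ≤ l + 1)
    (h2 : ∀ j, a ≤ j → j ≤ l → j ∈ K) (h3 : (a - 1) ∉ K) :
    pvA_goL K l c = (a - 1, c + (l + 1 - a)) :=
  pvA_goL_charAux K a h3 _ l c rfl h1 h2

theorem pvA_goR_charAux (K : List Int) (b : Int) (h3 : (b + 1) ∉ K) :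
    ∀ (n : Nat) (r c : Int), (b + 1 - r).toNat = n → r - 1 ≤ b →
      (∀ j, r ≤ j → j ≤ b → j ∈ K) → pvA_goR K r c = (b + 1, c + (b + 1 - r)) := by
  intro n
  induction n with
  | zero =>
    intro r c hn h1 h2
    have hr : r = b + 1 := by omega
    subst hr
    rw [pvA_goR_base K _ _ h3]
    exact Prod.ext rfl (by omega)
  | succ n ih =>
    intro r c hn h1 h2
    have hmem : r ∈ K := h2 r (le_refl _) (by omega)
    rw [pvA_goR_step K r c hmem,
      ih (r + 1) (c + 1) (by omega) (by omega) (fun j hj1 hj2 => h2 j (by omega) hj2)]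
    exact Prod.ext rfl (by omega)

theorem pvA_goR_char (K : List Int) (b r c : Int) (h1 : r - 1 ≤ b)
    (h2 : ∀ j, r ≤ j → j ≤ b → j ∈ K) (h3 : (b + 1) ∉ K) :
    pvA_goR K r c = (b + 1, c + (b + 1 - r)) :=
  pvA_goR_charAux K b h3 _ r c rfl h1 h2

theorem pvB_goL_spec (K : List Int) (v : PySem.Set Int) (l : Int) :
    (pvB_goL K v l).2 = (pvA_goL K l 0).1 ∧
      ∀ y, y ∈ (pvB_goL K v l).1 ↔ y ∈ v ∨ ((pvA_goL K l 0).1 < y ∧ y ≤ l) := by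
  fun_induction pvB_goL K v l with
  | case1 v left h ih =>
    obtain ⟨i1, i2⟩ := ih
    have hfst : (pvA_goL K left 0).1 = (pvA_goL K (left - 1) 0).1 := by
      rw [pvA_goL_step K left 0 h]
      exact pvA_goL_fst K (left - 1) 1 0
    have hle : (pvA_goL K (left - 1) 0).1 ≤ left - 1 := (pvA_goL_post K (left - 1) 0).2.1
    refine ⟨by rw [i1, hfst], ?_⟩
    intro y
    rw [i2 y, PySem.Set.mem_add, hfst]
    constructor
    · rintro ((hv | rfl) | ⟨hgt, hle2⟩)
      · exact Or.inl hv
      · exact Or.inr ⟨by omega, le_refl _⟩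
      · exact Or.inr ⟨hgt, by omega⟩
    · rintro (hv | ⟨hgt, hle2⟩)
      · exact Or.inl (Or.inl hv)
      · by_cases hy : y = left
        · exact Or.inl (Or.inr hy)
        · exact Or.inr ⟨hgt, by omega⟩
  | case2 v left h =>
    rw [pvA_goL_base K left 0 h]
    refine ⟨rfl, ?_⟩
    intro y
    constructor
    · exact fun hv => Or.inl hv
    · rintro (hv | ⟨h1, h2⟩)
      · exact hv
      · omega

theorem pvB_goR_spec (K : List Int) (v : PySem.Set Int) (r : Int) :
    (pvB_goR K v r).2 = (pvA_goR K r 0).1 ∧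
      ∀ y, y ∈ (pvB_goR K v r).1 ↔ y ∈ v ∨ (r ≤ y ∧ y < (pvA_goR K r 0).1) := by
  fun_induction pvB_goR K v r with
  | case1 v right h ih =>
    obtain ⟨i1, i2⟩ := ih
    have hfst : (pvA_goR K right 0).1 = (pvA_goR K (right + 1) 0).1 := by
      rw [pvA_goR_step K right 0 h]
      exact pvA_goR_fst K (right + 1) 1 0
    have hge : right + 1 ≤ (pvA_goR K (right + 1) 0).1 := (pvA_goR_post K (right + 1) 0).2.1
    refine ⟨by rw [i1, hfst], ?_⟩
    intro y
    rw [i2 y, PySem.Set.mem_add, hfst]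
    constructor
    · rintro ((hv | rfl) | ⟨h1, h2⟩)
      · exact Or.inl hv
      · exact Or.inr ⟨le_refl _, by omega⟩
      · exact Or.inr ⟨by omega, h2⟩
    · rintro (hv | ⟨h1, h2⟩)
      · exact Or.inl (Or.inl hv)
      · by_cases hy : y = right
        · exact Or.inl (Or.inr hy)
        · exact Or.inr ⟨by omega, h2⟩
  | case2 v right h =>
    rw [pvA_goR_base K right 0 h]
    refine ⟨rfl, ?_⟩
    intro y
    constructor
    · exact fun hv => Or.inl hv
    · rintro (hv | ⟨h1, h2⟩)
      · exact hv
      · omega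

def pvInv (K : List Int) (sA : List (Option Int) × Option Int)
    (sB : PySem.Set Int × List (Option Int) × Int) : Prop :=
  sA.1 = sB.2.1 ∧
  ((sA.2 = none ∧ sB.2.2 = -1) ∨ (sA.2 = some sB.2.2 ∧ 0 ≤ sB.2.2)) ∧
  ∀ y ∈ sB.1, y ∈ K ∧ (pvA_goR K (y + 1) (pvA_goL K (y - 1) 0).2).2 ≤ sB.2.2

def pvFA (K : List Int) (st : List (Option Int) × Option Int) (i : Int) :
    List (Option Int) × Option Int :=
  let lc := pvA_goL K (i - 1) 0
  let rc := pvA_goR K (i + 1) lc.2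
  if pvNegInfLt rc.2 st.2 then ([some (lc.1 + 1), some (rc.1 - 1)], some rc.2)
  else st

def pvFB (K : List Int) (st : PySem.Set Int × List (Option Int) × Int) (x : Int) :
    PySem.Set Int × List (Option Int) × Int :=
  if x ∈ st.1 then st
  else
    let vl := pvB_goL K (st.1.add x) (x - 1)
    let vr := pvB_goR K vl.1 (x + 1)
    if st.2.2 < vr.2 - vl.2 - 2 then (vr.1, [some (vl.2 + 1), some (vr.2 - 1)], vr.2 - vl.2 - 2)
    else (vr.1, st.2.1, st.2.2)

theorem pvStep (K : List Int) (x : Int) (hxK : x ∈ K)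
    (sA : List (Option Int) × Option Int) (sB : PySem.Set Int × List (Option Int) × Int)
    (hinv : pvInv K sA sB) : pvInv K (pvFA K sA x) (pvFB K sB x) := by
  obtain ⟨bA, mA⟩ := sA
  obtain ⟨v, bB, mB⟩ := sB
  obtain ⟨h1, h2, h3⟩ := hinv
  simp only at h1 h2 h3
  have postL := pvA_goL_post K (x - 1) 0
  have postR := pvA_goR_post K (x + 1) 0
  have hshift := pvA_goR_shift K (x + 1) (pvA_goL K (x - 1) 0).2
  have htot : (pvA_goR K (x + 1) (pvA_goL K (x - 1) 0).2).2
      = (pvA_goR K (x + 1) 0).1 - (pvA_goL K (x - 1) 0).1 - 2 := by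
    rw [hshift]
    have e1 := postL.2.2.1
    have e2 := postR.2.2.1
    simp only
    omega
  have htotnn : 0 ≤ (pvA_goR K (x + 1) (pvA_goL K (x - 1) 0).2).2 := by
    have e1 := postL.2.1
    have e2 := postR.2.1
    omega
  by_cases hxv : x ∈ v
  · -- B skips; A recomputes x's run but cannot improve
    obtain ⟨hK, hbound⟩ := h3 x hxv
    rcases h2 with ⟨hA0, hB0⟩ | ⟨hAs, hB0⟩
    · exfalso
      omega
    · have hcond : pvNegInfLt (pvA_goR K (x + 1) (pvA_goL K (x - 1) 0).2).2 mA = false := by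
        rw [hAs]
        simp only [pvNegInfLt, decide_eq_false_iff_not]
        omega
      simp only [pvFA, pvFB, if_pos hxv, hcond, Bool.false_eq_true, if_false]
      exact ⟨h1, Or.inr ⟨hAs, hB0⟩, h3⟩
  · -- both expand x's run
    have bl := pvB_goL_spec K (v.add x) (x - 1)
    have br := pvB_goR_spec K (pvB_goL K (v.add x) (x - 1)).1 (x + 1)
    have hl'le : (pvA_goL K (x - 1) 0).1 ≤ x - 1 := postL.2.1
    have hr'ge : x + 1 ≤ (pvA_goR K (x + 1) 0).1 := postR.2.1
    have hInt : ∀ j, (pvA_goL K (x - 1) 0).1 < j → j < (pvA_goR K (x + 1) 0).1 → j ∈ K := by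
      intro j hj1 hj2
      rcases lt_trichotomy j x with hj | hj | hj
      · exact postL.2.2.2 j hj1 (by omega)
      · exact hj ▸ hxK
      · exact postR.2.2.2 j (by omega) hj2
    have htotAll : ∀ y, (pvA_goL K (x - 1) 0).1 < y → y < (pvA_goR K (x + 1) 0).1 →
        (pvA_goR K (y + 1) (pvA_goL K (y - 1) 0).2).2
          = (pvA_goR K (x + 1) 0).1 - (pvA_goL K (x - 1) 0).1 - 2 := by
      intro y hy1 hy2
      have hcl : pvA_goL K (y - 1) 0
          = ((pvA_goL K (x - 1) 0).1 + 1 - 1, 0 + ((y - 1) + 1 - ((pvA_goL K (x - 1) 0).1 + 1))) :=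
        pvA_goL_char K ((pvA_goL K (x - 1) 0).1 + 1) (y - 1) 0 (by omega)
          (fun j hj1 hj2 => hInt j (by omega) (by omega))
          (by simpa using postL.1)
      have hcr : pvA_goR K (y + 1) (pvA_goL K (y - 1) 0).2
          = ((pvA_goR K (x + 1) 0).1 - 1 + 1,
              (pvA_goL K (y - 1) 0).2 + ((pvA_goR K (x + 1) 0).1 - 1 + 1 - (y + 1))) :=
        pvA_goR_char K ((pvA_goR K (x + 1) 0).1 - 1) (y + 1) (pvA_goL K (y - 1) 0).2 (by omega)
          (fun j hj1 hj2 => hInt j (by omega) (by omega))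
          (by simpa using postR.1)
      rw [hcr]
      have := congrArg Prod.snd hcl
      simp only at this
      omega
    have hmem : ∀ y, y ∈ (pvB_goR K (pvB_goL K (v.add x) (x - 1)).1 (x + 1)).1 ↔
        y ∈ v ∨ ((pvA_goL K (x - 1) 0).1 < y ∧ y < (pvA_goR K (x + 1) 0).1) := by
      intro y
      rw [br.2 y, bl.2 y, PySem.Set.mem_add]
      constructor
      · rintro (((hv | rfl) | ⟨ha, hb⟩) | ⟨ha, hb⟩)
        · exact Or.inl hv
        · exact Or.inr ⟨by omega, by omega⟩
        · exact Or.inr ⟨ha, by omega⟩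
        · exact Or.inr ⟨by omega, hb⟩
      · rintro (hv | ⟨ha, hb⟩)
        · exact Or.inl (Or.inl (Or.inl hv))
        · rcases lt_trichotomy y x with hy | hy | hy
          · exact Or.inl (Or.inr ⟨ha, by omega⟩)
          · exact Or.inl (Or.inl (Or.inr hy))
          · exact Or.inr ⟨by omega, hb⟩
    have hvl2 : (pvB_goL K (v.add x) (x - 1)).2 = (pvA_goL K (x - 1) 0).1 := bl.1
    have hvr2 : (pvB_goR K (pvB_goL K (v.add x) (x - 1)).1 (x + 1)).2 = (pvA_goR K (x + 1) 0).1 := br.1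
    by_cases hc : mB < (pvA_goR K (x + 1) 0).1 - (pvA_goL K (x - 1) 0).1 - 2
    · have hcondA : pvNegInfLt (pvA_goR K (x + 1) (pvA_goL K (x - 1) 0).2).2 mA = true := by
        rcases h2 with ⟨hA0, hB0⟩ | ⟨hAs, hB0⟩
        · rw [hA0]; rfl
        · rw [hAs]
          simp only [pvNegInfLt, decide_eq_true_eq]
          omega
      have hcondB : (mB < (pvB_goR K (pvB_goL K (v.add x) (x - 1)).1 (x + 1)).2
          - (pvB_goL K (v.add x) (x - 1)).2 - 2) := by rw [hvl2, hvr2]; exact hc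
      simp only [pvFA, pvFB, if_neg hxv, hcondA, if_true, if_pos hcondB]
      dsimp only [pvInv]
      refine ⟨by rw [hvl2, hvr2, ← pvA_goR_fst K (x+1) (pvA_goL K (x - 1) 0).2 0], ?_, ?_⟩
      · refine Or.inr ⟨?_, ?_⟩
        · rw [htot, hvl2, hvr2]
        · rw [hvl2, hvr2]; omega
      · intro y hy
        rcases (hmem y).mp hy with hv | ⟨ha, hb⟩
        · obtain ⟨hyK, hyb⟩ := h3 y hv
          exact ⟨hyK, by rw [hvl2, hvr2]; omega⟩
        · exact ⟨hInt y ha hb, by rw [hvl2, hvr2, htotAll y ha hb]⟩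
    · have hcondA : pvNegInfLt (pvA_goR K (x + 1) (pvA_goL K (x - 1) 0).2).2 mA = false := by
        rcases h2 with ⟨hA0, hB0⟩ | ⟨hAs, hB0⟩
        · exfalso; omega
        · rw [hAs]
          simp only [pvNegInfLt, decide_eq_false_iff_not]
          omega
      have hcondB : ¬ (mB < (pvB_goR K (pvB_goL K (v.add x) (x - 1)).1 (x + 1)).2
          - (pvB_goL K (v.add x) (x - 1)).2 - 2) := by rw [hvl2, hvr2]; exact hc
      simp only [pvFA, pvFB, if_neg hxv, hcondA, Bool.false_eq_true, if_false, if_neg hcondB]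
      dsimp only [pvInv]
      refine ⟨h1, h2, ?_⟩
      intro y hy
      rcases (hmem y).mp hy with hv | ⟨ha, hb⟩
      · exact h3 y hv
      · exact ⟨hInt y ha hb, by rw [htotAll y ha hb]; omega⟩

theorem pvMain (K : List Int) (ks : List Int) (hks : ∀ i ∈ ks, i ∈ K)
    (sA : List (Option Int) × Option Int) (sB : PySem.Set Int × List (Option Int) × Int)
    (hinv : pvInv K sA sB) :
    pvInv K (ks.foldl (pvFA K) sA) (ks.foldl (pvFB K) sB) := by
  induction ks generalizing sA sB with
  | nil => exact hinv
  | cons x t ih =>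
    exact ih (fun i hi => hks i (List.mem_cons_of_mem x hi))
      (pvFA K sA x) (pvFB K sB x)
      (pvStep K x (hks x List.mem_cons_self) sA sB hinv)

theorem pvGetD_fold (l : List Int) (d : PySem.Dict Int Bool) (i : Int)
    (h : i ∈ l ∨ d.getD i false = true) :
    (l.foldl (fun d j => d.insert j true) d).getD i false = true := by
  induction l generalizing d with
  | nil =>
    rcases h with hm | hd
    · cases hm
    · exact hd
  | cons a t ih =>
    apply ih
    rcases h with hm | hd
    · rcases List.mem_cons.mp hm with h3 | h3
      · right
        rw [PySem.Dict.getD_insert, if_pos h3]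
      · exact Or.inl h3
    · right
      rw [PySem.Dict.getD_insert]
      split_ifs with he
      · rfl
      · exact hd

theorem pvHashmap_keys (arr : List Int) :
    (arr.foldl (fun d j => d.insert j true) (PySem.Dict.empty : PySem.Dict Int Bool)).keys
      = PySem.Set.ofList arr := by
  rw [PySem.Dict.keys_foldl_insert (f := fun _ _ => true), PySem.Dict.keys_empty,
    PySem.Set.update_nil_left]

-- ===== VERDICT (by name: the statement is the Claim_ definition above) =====
theorem longestRange_spec : Claim_equal_longestRange := by
  intro arr _
  unfold Spec_longestRange longestRange longestRange_alt
  simp only [pvHashmap_keys]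
  have hA : (PySem.Set.ofList arr).foldl
      (fun (st : List (Option Int) × Option Int) i =>
        if (arr.foldl (fun d j => d.insert j true) (PySem.Dict.empty : PySem.Dict Int Bool)).getD i false = false then st
        else
          let lc := pvA_goL (PySem.Set.ofList arr) (i - 1) 0
          let rc := pvA_goR (PySem.Set.ofList arr) (i + 1) lc.2
          if pvNegInfLt rc.2 st.2 then ([some (lc.1 + 1), some (rc.1 - 1)], some rc.2)
          else st)
      ([none, none], none)
      = (PySem.Set.ofList arr).foldl (pvFA (PySem.Set.ofList arr)) ([none, none], none) := by
    apply PySem.List.foldl_congr_mem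
    intro acc x hx
    have hxarr : x ∈ arr := (PySem.Set.mem_ofList arr x).mp hx
    simp [pvGetD_fold arr PySem.Dict.empty x (Or.inl hxarr), pvFA]
  rw [hA]
  have h := pvMain (PySem.Set.ofList arr) (PySem.Set.ofList arr) (fun i hi => hi)
      ([none, none], none) (PySem.Set.empty, [none, none], -1)
      ⟨rfl, Or.inl ⟨rfl, rfl⟩, by intro y hy; cases hy⟩
  exact h.1
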